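-- pv_equiv track=rewrite | github.com/mjtomei/human | cognitive_gen/graph_search/cluster_analysis.py | compute_total_shared
-- ===== SOURCE A (Python) =====
-- from collections import defaultdict, Counter
--
-- def compute_total_shared(location_values: dict) -> Counter:
--     """Compute total shared values for each location."""
--     total_shared = Counter()
--     for loc, values in location_values.items():
--         for (dim, val) in values:
--             shared_count = sum(
--                 1 for other, other_vals in location_values.items()
--                 if other != loc and (dim, val) in other_vals
--             )
--             total_shared[loc] += shared_count
--     return total_shared
-- ===== SOURCE B (Python) =====
-- from collections import Counter
--
-- def compute_total_shared(location_values: dict) -> Counter: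
--     """Compute total shared values for each location (one pass per location)."""
--     containing = Counter()
--     for vals in location_values.values():
--         for pair in set(vals):
--             containing[pair] += 1
--     total_shared = Counter()
--     for loc, vals in location_values.items():
--         if vals:
--             total_shared[loc] = sum(containing[pair] - 1 for pair in vals)
--     return total_shared
-- ===== Notes on version B (the rewrite author's own statement) =====
-- stated objective: faster
-- what changed: Instead of scanning all other locations for every (dim,val) pair, B builds one Counter mapping each pair to the number of locations containing it and then charges each pair count-1, removing the nested scan.
import Mathlib
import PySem

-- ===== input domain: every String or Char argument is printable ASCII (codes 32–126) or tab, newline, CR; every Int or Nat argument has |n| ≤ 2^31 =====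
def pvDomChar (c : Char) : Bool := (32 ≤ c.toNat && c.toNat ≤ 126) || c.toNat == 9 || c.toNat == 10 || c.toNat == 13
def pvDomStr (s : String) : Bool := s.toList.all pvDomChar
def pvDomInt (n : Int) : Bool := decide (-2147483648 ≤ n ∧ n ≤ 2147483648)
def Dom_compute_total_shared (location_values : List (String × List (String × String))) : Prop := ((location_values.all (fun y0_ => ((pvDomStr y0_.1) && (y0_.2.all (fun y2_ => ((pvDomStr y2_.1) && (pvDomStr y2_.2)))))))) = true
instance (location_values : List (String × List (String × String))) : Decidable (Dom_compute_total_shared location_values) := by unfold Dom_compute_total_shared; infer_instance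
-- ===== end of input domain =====

-- B replaces A's nested scan over all other locations (per pair) by one Counter of
-- pair -> number-of-containing-locations, then each pair contributes count-1 (objective: faster).

-- ===== PORT A =====
def compute_total_shared (location_values : List (String × List (String × String))) : List (String × Int) :=
  (location_values.foldl (fun ts p =>
      p.2.foldl (fun ts pair =>
        let shared_count : Int := location_values.foldl
          (fun s q => s + (if q.1 ≠ p.1 ∧ pair ∈ q.2 then 1 else 0)) 0
        ts.modify p.1 0 (fun x => x + shared_count)) ts)
    PySem.Dict.empty).items

-- ===== PORT B =====
def compute_total_shared_alt (location_values : List (String × List (String × String))) : List (String × Int) :=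
  let containing : PySem.Dict (String × String) Int :=
    location_values.foldl (fun c q =>
      (PySem.Set.ofList q.2).foldl (fun c pr => c.modify pr 0 (fun x => x + 1)) c)
      PySem.Dict.empty
  (location_values.foldl (fun ts p =>
      if p.2 = [] then ts
      else ts.insert p.1 (p.2.foldl (fun s pr => s + (containing.getD pr 0 - 1)) 0))
    PySem.Dict.empty).items

-- ===== PRECONDITION & SPEC =====
-- Pre_ excludes association lists with duplicate location keys, which cannot arise from
-- A's Python-dict argument (dict keys are unique).
def Pre_compute_total_shared (location_values : List (String × List (String × String))) : Prop :=
  (location_values.map Prod.fst).Nodup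
instance (location_values : List (String × List (String × String))) : Decidable (Pre_compute_total_shared location_values) := by unfold Pre_compute_total_shared; infer_instance
def pvWitness_compute_total_shared : (List (String × List (String × String))) :=
  [("a", [("d", "v"), ("e", "w")]), ("b", [("d", "v")]), ("c", [])]
def Spec_compute_total_shared (location_values : List (String × List (String × String))) (out : List (String × Int)) : Prop := out = compute_total_shared_alt location_values
instance (location_values : List (String × List (String × String))) (out : List (String × Int)) : Decidable (Spec_compute_total_shared location_values out) := by unfold Spec_compute_total_shared; infer_instance

-- ===== CLAIM (what is proved, stated in full; the proofs are below) =====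
def Claim_equal_compute_total_shared : Prop := ∀ (location_values : List (String × List (String × String))), Dom_compute_total_shared location_values → Pre_compute_total_shared location_values → Spec_compute_total_shared location_values (compute_total_shared location_values)

-- ===== LEMMAS AND PROOFS =====

-- a foldl that adds f x is init + sum of the mapped list
theorem pvFoldlAdd {α : Type} (f : α → Int) :
    ∀ (l : List α) (init : Int),
      l.foldl (fun s x => s + f x) init = init + (l.map f).sum := by
  intro l
  induction l with
  | nil => simp
  | cons a rest ih => intro init; simp [List.foldl, ih]; ring

-- A's inner per-location loop collapses to a single insert of the sum
theorem pvBlockA {α : Type} (k : String) (h : α → Int) :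
    ∀ (pairs : List α) (ts : PySem.Dict String Int),
      pairs.foldl (fun ts pr => ts.insert k (ts.getD k 0 + h pr)) ts =
        if pairs = [] then ts else ts.insert k (ts.getD k 0 + (pairs.map h).sum) := by
  intro pairs
  induction pairs with
  | nil => intro ts; simp
  | cons a rest ih =>
    intro ts
    simp only [List.foldl, ih]
    by_cases hr : rest = []
    · simp [hr]
    · simp only [hr, List.map, List.sum_cons, reduceCtorEq, if_false,
        PySem.Dict.insert_insert_self, PySem.Dict.getD_insert_self]
      ring_nf

-- the counting dict: getD is the number of list entries whose value list contains the pair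
theorem pvContaining (pr : String × String) :
    ∀ (l : List (String × List (String × String))) (c : PySem.Dict (String × String) Int),
      (l.foldl (fun c q =>
        (PySem.Set.ofList q.2).foldl (fun c x => c.modify x 0 (fun y => y + 1)) c) c).getD pr 0
      = c.getD pr 0 + (l.map (fun q => if pr ∈ q.2 then (1 : Int) else 0)).sum := by
  intro l
  induction l with
  | nil => simp
  | cons q rest ih =>
    intro c
    simp only [List.foldl, ih, List.map, List.sum_cons]
    have h1 : ((PySem.Set.ofList q.2).foldl (fun c x => c.modify x 0 (fun y => y + 1)) c).getD pr 0
        = c.getD pr 0 + ((PySem.Set.ofList q.2).count pr : Int) := by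
      simpa using PySem.Dict.getD_foldl_modify_add_one (PySem.Set.ofList q.2) c pr
    rw [h1]
    by_cases hm : pr ∈ q.2
    · have : (PySem.Set.ofList q.2).count pr = 1 :=
        List.count_eq_one_of_mem (PySem.Set.nodup_ofList q.2) ((PySem.Set.mem_ofList _ _).2 hm)
      rw [this]; simp [hm]; ring
    · have : (PySem.Set.ofList q.2).count pr = 0 :=
        List.count_eq_zero_of_not_mem (fun hc => hm ((PySem.Set.mem_ofList _ _).1 hc))
      rw [this]; simp [hm]

-- shared_count = containing-count − 1, for a pair actually present at p
theorem pvSumSplit (p : String × List (String × String)) (pr : String × String)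
    (hpr : pr ∈ p.2) :
    ∀ (l : List (String × List (String × String))),
      p ∈ l → (l.map Prod.fst).Nodup →
      (l.map (fun q => if pr ∈ q.2 then (1 : Int) else 0)).sum
        = (l.map (fun q => if q.1 ≠ p.1 ∧ pr ∈ q.2 then (1 : Int) else 0)).sum + 1 := by
  intro l
  induction l with
  | nil => intro h; exact absurd h (List.not_mem_nil)
  | cons a rest ih =>
    intro hp hnd
    simp only [List.map, List.sum_cons]
    have hnd' : a.1 ∉ rest.map Prod.fst ∧ (rest.map Prod.fst).Nodup := by
      rw [List.map_cons, List.nodup_cons] at hnd; exact hnd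
    rcases List.mem_cons.1 hp with hpa | hpr2
    · -- p is the head: head terms give the +1, tails agree termwise
      subst hpa
      have hkeys : ∀ q ∈ rest, q.1 ≠ p.1 := by
        intro q hq hqe
        exact hnd'.1 (hqe ▸ List.mem_map_of_mem hq)
      have htail : (rest.map (fun q => if pr ∈ q.2 then (1 : Int) else 0))
          = rest.map (fun q => if q.1 ≠ p.1 ∧ pr ∈ q.2 then (1 : Int) else 0) := by
        apply List.map_congr_left
        intro q hq
        simp [hkeys q hq]
      rw [htail]
      simp [hpr]
      ring
    · -- p is in the tail: head terms agree, tail by IH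
      have hane : a.1 ≠ p.1 := by
        intro hae
        exact hnd'.1 (hae ▸ List.mem_map_of_mem hpr2)
      have hh : (if pr ∈ a.2 then (1 : Int) else 0)
          = (if a.1 ≠ p.1 ∧ pr ∈ a.2 then (1 : Int) else 0) := by simp [hane]
      rw [hh, ih hpr2 hnd'.2]
      ring

-- canonical form of A's outer loop (fresh distinct keys)
theorem pvFoldA (g : String × List (String × String) → Int) :
    ∀ (l : List (String × List (String × String))) (d : PySem.Dict String Int),
      (l.map Prod.fst).Nodup → (∀ q ∈ l, d.contains q.1 = false) →
      (l.foldl (fun ts p => if p.2 = [] then ts else ts.insert p.1 (ts.getD p.1 0 + g p)) d).items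
        = d.items ++ (l.filter (fun p => !decide (p.2 = []))).map (fun p => (p.1, g p)) := by
  intro l
  induction l with
  | nil => intro d _ _; simp
  | cons a rest ih =>
    intro d hnd hfresh
    have hnd' : a.1 ∉ rest.map Prod.fst ∧ (rest.map Prod.fst).Nodup := by
      rw [List.map_cons, List.nodup_cons] at hnd; exact hnd
    by_cases ha : a.2 = []
    · simp only [List.foldl_cons, List.filter_cons, ha, decide_true, Bool.not_true,
        if_true]
      rw [ih _ hnd'.2]
      · simp [ha]
      · intro q hq; exact hfresh q (List.mem_cons_of_mem a hq)
    · have hda : d.getD a.1 0 = 0 :=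
        PySem.Dict.getD_of_not_contains _ _ (hfresh a List.mem_cons_self)
      simp only [List.foldl_cons, List.filter_cons, ha, decide_false, Bool.not_false,
        if_false, if_true, hda, zero_add]
      rw [ih _ hnd'.2]
      · rw [PySem.Dict.items_insert_of_not_contains (h := hfresh a List.mem_cons_self)]
        simp
      · intro q hq
        rw [PySem.Dict.contains_insert]
        have : q.1 ≠ a.1 := by
          intro hqe
          exact hnd'.1 (hqe ▸ List.mem_map_of_mem hq)
        simp [this, hfresh q (List.mem_cons_of_mem a hq)]

-- canonical form of B's outer loop (fresh distinct keys)
theorem pvFoldB (g : String × List (String × String) → Int) :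
    ∀ (l : List (String × List (String × String))) (d : PySem.Dict String Int),
      (l.map Prod.fst).Nodup → (∀ q ∈ l, d.contains q.1 = false) →
      (l.foldl (fun ts p => if p.2 = [] then ts else ts.insert p.1 (g p)) d).items
        = d.items ++ (l.filter (fun p => !decide (p.2 = []))).map (fun p => (p.1, g p)) := by
  intro l
  induction l with
  | nil => intro d _ _; simp
  | cons a rest ih =>
    intro d hnd hfresh
    have hnd' : a.1 ∉ rest.map Prod.fst ∧ (rest.map Prod.fst).Nodup := by
      rw [List.map_cons, List.nodup_cons] at hnd; exact hnd
    by_cases ha : a.2 = []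
    · simp only [List.foldl_cons, List.filter_cons, ha, decide_true, Bool.not_true,
        if_true]
      rw [ih _ hnd'.2]
      · simp [ha]
      · intro q hq; exact hfresh q (List.mem_cons_of_mem a hq)
    · simp only [List.foldl_cons, List.filter_cons, ha, decide_false, Bool.not_false,
        if_false, if_true]
      rw [ih _ hnd'.2]
      · rw [PySem.Dict.items_insert_of_not_contains (h := hfresh a List.mem_cons_self)]
        simp
      · intro q hq
        rw [PySem.Dict.contains_insert]
        have : q.1 ≠ a.1 := by
          intro hqe
          exact hnd'.1 (hqe ▸ List.mem_map_of_mem hq)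
        simp [this, hfresh q (List.mem_cons_of_mem a hq)]

-- ===== VERDICT (by name: the statement is the Claim_ definition above) =====
theorem compute_total_shared_spec : Claim_equal_compute_total_shared := by
  intro lv _dom hpre
  unfold Spec_compute_total_shared
  have hfresh : ∀ q ∈ lv, (PySem.Dict.empty : PySem.Dict String Int).contains q.1 = false := by
    intro q _; simp
  have hA : compute_total_shared lv
      = (lv.filter (fun p => !decide (p.2 = []))).map (fun p =>
          (p.1, (p.2.map (fun pair => lv.foldl
            (fun s q => s + (if q.1 ≠ p.1 ∧ pair ∈ q.2 then (1 : Int) else 0)) 0)).sum)) := by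
    unfold compute_total_shared
    have hfun : (fun (ts : PySem.Dict String Int) (p : String × List (String × String)) =>
        p.2.foldl (fun ts pair =>
          let shared_count : Int := lv.foldl
            (fun s q => s + (if q.1 ≠ p.1 ∧ pair ∈ q.2 then 1 else 0)) 0
          ts.modify p.1 0 (fun x => x + shared_count)) ts)
      = (fun ts p => if p.2 = [] then ts
          else ts.insert p.1 (ts.getD p.1 0 + (p.2.map (fun pair => lv.foldl
            (fun s q => s + (if q.1 ≠ p.1 ∧ pair ∈ q.2 then (1 : Int) else 0)) 0)).sum)) := by
      funext ts p
      exact pvBlockA p.1 _ p.2 ts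
    rw [hfun, pvFoldA _ lv PySem.Dict.empty hpre hfresh]
    rfl
  have hB : compute_total_shared_alt lv
      = (lv.filter (fun p => !decide (p.2 = []))).map (fun p =>
          (p.1, (p.2.map (fun pr => (lv.foldl (fun c q =>
              (PySem.Set.ofList q.2).foldl (fun c pr => c.modify pr 0 (fun x => x + 1)) c)
              (PySem.Dict.empty : PySem.Dict (String × String) Int)).getD pr 0 - 1)).sum)) := by
    have h0 : compute_total_shared_alt lv
        = (lv.foldl (fun ts p => if p.2 = [] then ts
            else ts.insert p.1 (p.2.foldl (fun s pr => s + ((lv.foldl (fun c q =>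
              (PySem.Set.ofList q.2).foldl (fun c pr => c.modify pr 0 (fun x => x + 1)) c)
              (PySem.Dict.empty : PySem.Dict (String × String) Int)).getD pr 0 - 1)) 0))
            PySem.Dict.empty).items := rfl
    rw [h0]
    have hfun : (fun (ts : PySem.Dict String Int) (p : String × List (String × String)) =>
        if p.2 = [] then ts
        else ts.insert p.1 (p.2.foldl (fun s pr => s + ((lv.foldl (fun c q =>
          (PySem.Set.ofList q.2).foldl (fun c pr => c.modify pr 0 (fun x => x + 1)) c)
          (PySem.Dict.empty : PySem.Dict (String × String) Int)).getD pr 0 - 1)) 0))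
      = (fun ts p => if p.2 = [] then ts
          else ts.insert p.1 ((p.2.map (fun pr => (lv.foldl (fun c q =>
            (PySem.Set.ofList q.2).foldl (fun c pr => c.modify pr 0 (fun x => x + 1)) c)
            (PySem.Dict.empty : PySem.Dict (String × String) Int)).getD pr 0 - 1)).sum)) := by
      funext ts p
      rw [pvFoldlAdd, zero_add]
    rw [hfun, pvFoldB _ lv PySem.Dict.empty hpre hfresh]
    rfl
  rw [hA, hB]
  apply List.map_congr_left
  intro p hpf
  have hp : p ∈ lv := List.mem_of_mem_filter hpf
  have hsum : (p.2.map (fun pair => lv.foldl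
        (fun s q => s + (if q.1 ≠ p.1 ∧ pair ∈ q.2 then (1 : Int) else 0)) 0))
      = p.2.map (fun pr => (lv.foldl (fun c q =>
          (PySem.Set.ofList q.2).foldl (fun c pr => c.modify pr 0 (fun x => x + 1)) c)
          (PySem.Dict.empty : PySem.Dict (String × String) Int)).getD pr 0 - 1) := by
    apply List.map_congr_left
    intro pair hpair
    have hc : (lv.foldl (fun c q =>
          (PySem.Set.ofList q.2).foldl (fun c pr => c.modify pr 0 (fun x => x + 1)) c)
          (PySem.Dict.empty : PySem.Dict (String × String) Int)).getD pair 0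
        = (lv.map (fun q => if pair ∈ q.2 then (1 : Int) else 0)).sum := by
      rw [pvContaining pair lv PySem.Dict.empty]
      simp
    have hs : lv.foldl (fun s q => s + (if q.1 ≠ p.1 ∧ pair ∈ q.2 then (1 : Int) else 0)) 0
        = (lv.map (fun q => if q.1 ≠ p.1 ∧ pair ∈ q.2 then (1 : Int) else 0)).sum := by
      rw [pvFoldlAdd, zero_add]
    have hsplit := pvSumSplit p pair hpair lv hp hpre
    rw [hc, hs, hsplit]
    ring
  rw [hsum]
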